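-- pv_equiv track=rewrite | github.com/vivisect/vivisect | attic/envi/bits.py | intwidth
-- ===== SOURCE A (Python) =====
-- def intwidth(val):
--     if val < 0:
--         val = abs(val)
--     ret = 0
--     while val:
--         ret += 1
--         val = val >> 8
--     return ret
-- ===== SOURCE B (Python) =====
-- def intwidth(val):
--     return (abs(val).bit_length() + 7) // 8
-- ===== Notes on version B (the rewrite author's own statement) =====
-- stated objective: idiomatic
-- what changed: Replaced the shift-by-eight counting loop with a closed form: ceiling-divide the builtin bit_length of the absolute value into bytes.
import Mathlib
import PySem

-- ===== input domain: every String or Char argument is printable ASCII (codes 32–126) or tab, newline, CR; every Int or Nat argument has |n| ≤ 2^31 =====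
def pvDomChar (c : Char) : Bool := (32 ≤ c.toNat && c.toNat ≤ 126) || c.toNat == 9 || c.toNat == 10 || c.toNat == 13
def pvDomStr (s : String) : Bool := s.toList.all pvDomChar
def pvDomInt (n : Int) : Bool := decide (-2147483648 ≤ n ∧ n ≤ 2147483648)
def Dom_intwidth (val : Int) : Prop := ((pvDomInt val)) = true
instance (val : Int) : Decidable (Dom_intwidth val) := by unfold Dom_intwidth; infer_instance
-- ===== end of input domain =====

-- B replaces A's shift-by-8 counting loop with the closed form (bit_length + 7) // 8 (idiomatic).

-- ===== PORT A =====
-- A's `while val: ret += 1; val >>= 8` loop, after `val = abs(val)`, runs over a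
-- nonnegative value, so the loop state is a Nat; `val >> 8` is `v >>> 8`.
def intwidthLoop (v : Nat) (ret : Int) : Int :=
  if h : v = 0 then ret
  else intwidthLoop (v >>> 8) (ret + 1)
decreasing_by
  simp only [Nat.shiftRight_eq_div_pow]
  exact Nat.div_lt_self (Nat.pos_of_ne_zero h) (by norm_num)

def intwidth (val : Int) : Int := intwidthLoop val.natAbs 0

-- ===== PORT B =====
-- bit_length of a Nat is Nat.size
def intwidth_alt (val : Int) : Int := ((Nat.size val.natAbs + 7) / 8 : Nat)

-- ===== PRECONDITION & SPEC =====
def Spec_intwidth (val : Int) (out : Int) : Prop := out = intwidth_alt val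
instance (val : Int) (out : Int) : Decidable (Spec_intwidth val out) := by unfold Spec_intwidth; infer_instance

-- ===== CLAIM (what is proved, stated in full; the proofs are below) =====
def Claim_equal_intwidth : Prop := ∀ (val : Int), Dom_intwidth val → Spec_intwidth val (intwidth val)

-- ===== LEMMAS AND PROOFS =====

theorem size_shiftRight8 (v : Nat) : Nat.size (v >>> 8) = Nat.size v - 8 := by
  rcases Nat.eq_zero_or_pos v with h | hv
  · subst h; simp
  apply le_antisymm
  · rw [Nat.size_le, Nat.shiftRight_eq_div_pow]
    by_cases h8 : 8 ≤ Nat.size v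
    · have : v < 2 ^ Nat.size v := Nat.size_le.mp le_rfl
      have : v < 2 ^ (Nat.size v - 8) * 2 ^ 8 := by
        rwa [← pow_add, Nat.sub_add_cancel h8]
      exact Nat.div_lt_of_lt_mul (by rwa [mul_comm] at this)
    · have hs : Nat.size v - 8 = 0 := by omega
      rw [hs]
      have h0 : v < 2 ^ Nat.size v := Nat.size_le.mp le_rfl
      have hle8 : Nat.size v ≤ 8 := by omega
      have hlt : v < 2 ^ 8 := lt_of_lt_of_le h0 (Nat.pow_le_pow_right two_pos hle8)
      simp only [pow_zero, Nat.lt_one_iff]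
      exact Nat.div_eq_of_lt hlt
  · by_cases hbig : 9 ≤ Nat.size v
    case neg =>
      have hz : Nat.size v - 8 = 0 := by omega
      exact hz ▸ Nat.zero_le _
    case pos =>
      have hpos : 0 < Nat.size v := by omega
      have hlt1 : Nat.size v - 1 < Nat.size v := Nat.sub_lt hpos one_pos
      have h1 : 2 ^ (Nat.size v - 1) ≤ v := Nat.lt_size.mp hlt1
      have hle : Nat.size v - 8 - 1 + 8 ≤ Nat.size v - 1 := by omega
      have h2 : 2 ^ (Nat.size v - 8 - 1) * 2 ^ 8 ≤ v := by
        calc 2 ^ (Nat.size v - 8 - 1) * 2 ^ 8 = 2 ^ (Nat.size v - 8 - 1 + 8) := (pow_add 2 _ 8).symm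
          _ ≤ 2 ^ (Nat.size v - 1) := Nat.pow_le_pow_right two_pos hle
          _ ≤ v := h1
      have h3 : Nat.size v - 8 - 1 < Nat.size (v >>> 8) := by
        rw [Nat.lt_size, Nat.shiftRight_eq_div_pow]
        exact Nat.le_div_iff_mul_le (by norm_num) |>.mpr h2
      omega

theorem intwidthLoop_eq (v : Nat) : ∀ ret : Int,
    intwidthLoop v ret = ret + ((Nat.size v + 7) / 8 : Nat) := by
  induction v using Nat.strong_induction_on with
  | _ v ih =>
    intro ret
    rw [intwidthLoop]
    split_ifs with h
    · subst h; simp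
    · have hlt : v >>> 8 < v := by
        simp only [Nat.shiftRight_eq_div_pow]
        exact Nat.div_lt_self (Nat.pos_of_ne_zero h) (by norm_num)
      rw [ih _ hlt, size_shiftRight8]
      have hs : 1 ≤ Nat.size v := Nat.size_pos.mpr (Nat.pos_of_ne_zero h)
      have : ((Nat.size v + 7) / 8 : Nat) = (Nat.size v - 8 + 7) / 8 + 1 := by omega
      rw [this]
      push_cast
      ring

-- ===== VERDICT (by name: the statement is the Claim_ definition above) =====
theorem intwidth_spec : Claim_equal_intwidth := by
  intro val _
  unfold Spec_intwidth intwidth intwidth_alt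
  rw [intwidthLoop_eq]
  simp
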